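-- pv_equiv track=rewrite | github.com/yjainexcollo/Clinic-AI-Backend | scripts/queue_debug.py | extract_storage_account
-- ===== SOURCE A (Python) =====
-- def extract_storage_account(conn_str: str) -> str:
--     """Extract storage account name from connection string."""
--     if not conn_str:
--         return "unknown"
--     try:
--         for part in conn_str.split(";"):
--             if part.startswith("AccountName="):
--                 return part.split("=", 1)[1]
--     except Exception:
--         pass
--     return "unknown"
-- ===== SOURCE B (Python) =====
-- def extract_storage_account(conn_str: str) -> str:
--     """Extract storage account name from connection string."""
--     d = {}
--     for part in conn_str.split(";"):
--         kv = part.split("=", 1)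
--         if len(kv) == 2:
--             d.setdefault(kv[0], kv[1])
--     return d.get("AccountName", "unknown")
-- ===== Notes on version B (the rewrite author's own statement) =====
-- stated objective: idiomatic
-- what changed: Replaces the scan-and-early-return over ';'-parts with parse-all-parts-into-a-dict (first occurrence wins via setdefault) followed by a single d.get('AccountName', 'unknown') lookup.
import Mathlib
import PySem

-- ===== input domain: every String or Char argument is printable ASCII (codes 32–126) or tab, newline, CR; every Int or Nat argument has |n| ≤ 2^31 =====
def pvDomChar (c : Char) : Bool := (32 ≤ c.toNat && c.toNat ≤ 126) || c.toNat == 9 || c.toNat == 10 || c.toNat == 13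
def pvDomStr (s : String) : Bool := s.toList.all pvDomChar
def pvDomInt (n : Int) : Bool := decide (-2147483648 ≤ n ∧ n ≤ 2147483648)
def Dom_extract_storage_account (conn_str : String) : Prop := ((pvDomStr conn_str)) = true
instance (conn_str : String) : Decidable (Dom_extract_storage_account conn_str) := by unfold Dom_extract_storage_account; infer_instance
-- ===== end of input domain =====

-- B replaces A's scan-and-early-return over ';'-parts with a parse-into-dict (first key wins)
-- then a single lookup; same O(n) cost, more idiomatic decomposition.

-- ===== PORT A =====
-- the for-loop with early return over conn_str.split(";")
def pvLoopA : List String → String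
  | [] => "unknown"
  | part :: rest =>
    if PySem.Str.startswith part "AccountName=" then
      -- part.split("=", 1)[1]; the startswith guard guarantees index 1 exists
      (PySem.List.pyGet? ((PySem.Str.splitMax? part "=" 1).getD []) 1).getD ""
    else pvLoopA rest

def extract_storage_account (conn_str : String) : String :=
  if conn_str == "" then "unknown"
  else pvLoopA ((PySem.Str.split? conn_str ";").getD [])

-- ===== PORT B =====
-- loop body: kv = part.split("=", 1); if len(kv) == 2: d.setdefault(kv[0], kv[1])
def pvStep (d : PySem.Dict String String) (part : String) : PySem.Dict String String :=
  -- kv = part.split("=", 1); if len(kv) == 2: d.setdefault(kv[0], kv[1])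
  if ((PySem.Str.splitMax? part "=" 1).getD []).length == 2 then
    d.setdefault ((PySem.List.pyGet? ((PySem.Str.splitMax? part "=" 1).getD []) 0).getD "")
                 ((PySem.List.pyGet? ((PySem.Str.splitMax? part "=" 1).getD []) 1).getD "")
  else d

def extract_storage_account_alt (conn_str : String) : String :=
  (((PySem.Str.split? conn_str ";").getD []).foldl pvStep PySem.Dict.empty).getD "AccountName" "unknown"

-- ===== PRECONDITION & SPEC =====
def Spec_extract_storage_account (conn_str : String) (out : String) : Prop := out = extract_storage_account_alt conn_str
instance (conn_str : String) (out : String) : Decidable (Spec_extract_storage_account conn_str out) := by unfold Spec_extract_storage_account; infer_instance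

-- ===== CLAIM (what is proved, stated in full; the proofs are below) =====
def Claim_equal_extract_storage_account : Prop := ∀ (conn_str : String), Dom_extract_storage_account conn_str → Spec_extract_storage_account conn_str (extract_storage_account conn_str)

-- ===== LEMMAS AND PROOFS =====

-- Once maxsplit is exhausted (m = 0), go returns the remainder as the last piece.
theorem pvGo0 (fuel : Nat) (l cur : List Char) (acc : List (List Char)) :
    PySem.Chars.splitOnMax.go ['='] fuel 0 l cur acc = ((cur.reverse ++ l) :: acc).reverse := by
  cases fuel with
  | zero => simp [PySem.Chars.splitOnMax.go]
  | succ f => cases l <;> simp [PySem.Chars.splitOnMax.go]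

-- go with maxsplit 1 splits at the first '=' if any.
theorem pvGo1 (fuel : Nat) (l cur : List Char) (acc : List (List Char)) (h : l.length < fuel) :
    PySem.Chars.splitOnMax.go ['='] fuel 1 l cur acc =
      if '=' ∈ l then acc.reverse ++ [cur.reverse ++ l.takeWhile (· != '='), (l.dropWhile (· != '=')).tail]
      else acc.reverse ++ [cur.reverse ++ l] := by
  induction fuel generalizing l cur acc with
  | zero => omega
  | succ f ih =>
    cases l with
    | nil => simp [PySem.Chars.splitOnMax.go]
    | cons c rest =>
      by_cases hc : c = '='
      · subst hc
        simp [PySem.Chars.splitOnMax.go, List.isPrefixOf, pvGo0, List.takeWhile, List.dropWhile]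
      · have hlt : rest.length < f := by simp at h; omega
        have hcb : (c == '=') = false := by simp [hc]
        simp [PySem.Chars.splitOnMax.go, List.isPrefixOf, ih _ _ _ hlt, List.takeWhile, List.dropWhile,
          bne, Ne.symm hc, hcb]

-- part.split("=", 1) as a closed form
theorem pvKvEq (part : String) :
    (PySem.Str.splitMax? part "=" 1).getD [] =
      if '=' ∈ part.toList then
        [String.ofList (part.toList.takeWhile (· != '=')),
         String.ofList ((part.toList.dropWhile (· != '=')).tail)]
      else [part] := by
  have h : PySem.Chars.splitOnMax part.toList ['='] 1 =
      if '=' ∈ part.toList then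
        [part.toList.takeWhile (· != '='), (part.toList.dropWhile (· != '=')).tail]
      else [part.toList] := by
    unfold PySem.Chars.splitOnMax
    have := pvGo1 (part.toList.length + 1) part.toList [] [] (by omega)
    simpa using this
  simp [PySem.Str.splitMax?, PySem.Chars.splitMax?, h]
  split_ifs <;> simp

-- part.startswith("AccountName=") characterised via the first '='
theorem pvSW (part : String) :
    PySem.Str.startswith part "AccountName=" = true ↔
      ('=' ∈ part.toList ∧ part.toList.takeWhile (· != '=') = "AccountName".toList) := by
  rw [PySem.Str.startswith_eq, PySem.Chars.startswith_iff]
  constructor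
  · rintro ⟨t, ht⟩
    have hsplit : part.toList = "AccountName".toList ++ '=' :: t := by
      rw [← ht]; rfl
    constructor
    · rw [hsplit]; simp
    · rw [hsplit, List.takeWhile_append]
      simp [List.takeWhile]
  · rintro ⟨hm, htw⟩
    have hd : part.toList.dropWhile (· != '=') ≠ [] := by
      intro hnil
      rw [List.dropWhile_eq_nil_iff] at hnil
      have := hnil '=' hm
      simp at this
    have hh := List.head_dropWhile_not (· != '=') hd
    have hcons : part.toList.dropWhile (· != '=') =
        '=' :: (part.toList.dropWhile (· != '=')).tail := by
      cases hdw : part.toList.dropWhile (· != '=') with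
      | nil => exact absurd hdw hd
      | cons c t =>
        have h2 := hh
        simp only [hdw, List.head_cons] at h2
        simp at h2
        simp [h2]
    refine ⟨(part.toList.dropWhile (· != '=')).tail, ?_⟩
    conv_rhs => rw [← List.takeWhile_append_dropWhile (p := (· != '=')) (l := part.toList)]
    rw [htw, hcons]
    simp

-- looking up a key a dict does not contain yields the default
theorem pvGetDNone (d : PySem.Dict String String) (k : String) (v : String)
    (h : d.contains k = false) : d.getD k v = v := by
  unfold PySem.Dict.getD PySem.Dict.get? PySem.Dict.contains at *
  have : d.items.find? (fun p => p.1 == k) = none := by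
    rw [List.find?_eq_none]
    intro p hp
    simp only [List.any_eq_false] at h
    exact h p hp
  simp [this]

-- a step never disturbs a key already present
theorem pvStepKeeps (d : PySem.Dict String String) (part : String)
    (h : d.contains "AccountName" = true) :
    (pvStep d part).getD "AccountName" "unknown" = d.getD "AccountName" "unknown" ∧
      (pvStep d part).contains "AccountName" = true := by
  unfold pvStep
  split_ifs with hl
  · set k := ((PySem.List.pyGet? ((PySem.Str.splitMax? part "=" 1).getD []) 0).getD "")
    set v := ((PySem.List.pyGet? ((PySem.Str.splitMax? part "=" 1).getD []) 1).getD "")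
    by_cases hk : k = "AccountName"
    · rw [hk, PySem.Dict.setdefault_of_contains d v h]; exact ⟨rfl, h⟩
    · constructor
      · unfold PySem.Dict.getD
        rw [PySem.Dict.get?_setdefault_of_ne d v (Ne.symm hk)]
      · rw [PySem.Dict.contains_setdefault]; simp [h]
  · exact ⟨rfl, h⟩

-- once "AccountName" is in the dict, the rest of the fold cannot change its value
theorem pvAfter (parts : List String) (d : PySem.Dict String String)
    (h : d.contains "AccountName" = true) :
    (parts.foldl pvStep d).getD "AccountName" "unknown" = d.getD "AccountName" "unknown" := by
  induction parts generalizing d with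
  | nil => rfl
  | cons part rest ih =>
    obtain ⟨h1, h2⟩ := pvStepKeeps d part h
    simp only [List.foldl_cons]
    rw [ih _ h2, h1]

-- main invariant: A's scan over the remaining parts equals B's fold, as long as
-- the dict does not yet contain "AccountName"
theorem pvMain (parts : List String) (d : PySem.Dict String String)
    (h : d.contains "AccountName" = false) :
    pvLoopA parts = (parts.foldl pvStep d).getD "AccountName" "unknown" := by
  induction parts generalizing d with
  | nil => simp [pvLoopA, pvGetDNone d _ _ h]
  | cons part rest ih =>
    simp only [List.foldl_cons]
    by_cases hs : PySem.Str.startswith part "AccountName=" = true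
    · obtain ⟨hm, htw⟩ := (pvSW part).mp hs
      have hkv : (PySem.Str.splitMax? part "=" 1).getD [] =
          ["AccountName", String.ofList ((part.toList.dropWhile (· != '=')).tail)] := by
        rw [pvKvEq, if_pos hm, htw]; rfl
      have hstep0 : pvStep d part =
          d.setdefault "AccountName" (String.ofList ((part.toList.dropWhile (· != '=')).tail)) := by
        unfold pvStep
        rw [hkv]
        simp [PySem.List.pyGet?, PySem.List.pyIdx?]
      have hstep : pvStep d part =
          d.insert "AccountName" (String.ofList ((part.toList.dropWhile (· != '=')).tail)) := by
        rw [hstep0]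
        exact PySem.Dict.setdefault_of_not_contains d _ h
      have hcontains : (pvStep d part).contains "AccountName" = true := by
        rw [hstep0, PySem.Dict.contains_setdefault]
        simp
      rw [pvAfter rest _ hcontains, hstep, PySem.Dict.getD_insert]
      simp only [pvLoopA, hs, if_true, hkv]
      simp [PySem.List.pyGet?, PySem.List.pyIdx?]
    · have hs' : PySem.Str.startswith part "AccountName=" = false := by
        cases hb : PySem.Str.startswith part "AccountName=" <;> simp_all
      have hkeep : (pvStep d part).contains "AccountName" = false := by
        unfold pvStep
        split_ifs with hl
        · rw [PySem.Dict.contains_setdefault]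
          have hne : ((PySem.List.pyGet? ((PySem.Str.splitMax? part "=" 1).getD []) 0).getD "")
              ≠ "AccountName" := by
            rw [pvKvEq] at hl ⊢
            split_ifs at hl ⊢ with hm
            · simp [PySem.List.pyGet?, PySem.List.pyIdx?]
              intro heq
              apply hs
              rw [pvSW]
              refine ⟨hm, ?_⟩
              have := congrArg String.toList heq
              simpa using this
            · simp at hl
          simp [h, Ne.symm hne]
        · exact h
      simp only [pvLoopA, hs', Bool.false_eq_true, if_false]
      exact ih _ hkeep

-- ===== VERDICT (by name: the statement is the Claim_ definition above) =====
theorem extract_storage_account_spec : Claim_equal_extract_storage_account := by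
  intro conn_str _
  unfold Spec_extract_storage_account extract_storage_account extract_storage_account_alt
  by_cases h : conn_str = ""
  · subst h; decide
  · rw [if_neg (by simpa using h)]
    exact pvMain _ PySem.Dict.empty rfl
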